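-- pv_equiv track=rewrite | github.com/scientific-computing-user/amam-benchmark-site | repro/benchmark/run_deep_survey.py | build_subset_offsets
-- ===== SOURCE A (Python) =====
-- from typing import Dict, List, Tuple
--
-- def build_subset_offsets(phase_count: Dict[str, int]) -> Tuple[Dict[str, int], Dict[str, List[int]], int]:
--     offsets: Dict[str, int] = {}
--     subset_ids: Dict[str, List[int]] = {}
--     current = 0
--     for sid in sorted(phase_count.keys()):
--         offsets[sid] = current
--         ids = list(range(current, current + phase_count[sid]))
--         subset_ids[sid] = ids
--         current += phase_count[sid]
--     return offsets, subset_ids, current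
-- ===== SOURCE B (Python) =====
-- def build_subset_offsets(phase_count):
--     # Closed form: a key's offset is the total count over all strictly smaller
--     # keys; no running accumulator / prefix pass.
--     def start(k):
--         return sum(c for j, c in phase_count.items() if j < k)
--     offsets = {k: start(k) for k in sorted(phase_count)}
--     subset_ids = {k: list(range(o, o + phase_count[k])) for k, o in offsets.items()}
--     return offsets, subset_ids, sum(phase_count.values())
-- ===== Notes on version B (the rewrite author's own statement) =====
-- stated objective: alternative
-- what changed: Replaces A's single stateful loop with a running total by a closed form: each key's offset is computed directly as the sum of the counts of all strictly smaller keys (a per-key filtered sum, no accumulator and no prefix pass), and the final total is sum(phase_count.values()).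
import Mathlib
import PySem

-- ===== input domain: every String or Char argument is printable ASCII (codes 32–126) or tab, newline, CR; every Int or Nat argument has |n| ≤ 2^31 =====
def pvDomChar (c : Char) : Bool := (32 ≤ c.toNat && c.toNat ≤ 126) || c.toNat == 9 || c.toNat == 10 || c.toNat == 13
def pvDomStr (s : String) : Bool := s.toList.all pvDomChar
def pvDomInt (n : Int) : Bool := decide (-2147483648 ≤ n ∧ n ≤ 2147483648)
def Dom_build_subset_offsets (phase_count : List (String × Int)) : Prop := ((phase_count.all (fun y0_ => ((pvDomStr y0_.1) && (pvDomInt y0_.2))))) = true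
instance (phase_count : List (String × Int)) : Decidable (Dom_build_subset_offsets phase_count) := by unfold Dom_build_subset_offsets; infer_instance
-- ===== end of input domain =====

-- B replaces A's running-total loop by a closed form: a key's offset is the sum of the
-- counts of all strictly smaller keys; objective: alternative (B is quadratic, not faster).

-- ===== PORT A =====
-- A's for-loop over sorted(phase_count.keys()) with state (offsets, subset_ids, current).
-- phase_count[sid] is ported as getD _ 0: sid always comes from phase_count's own keys.
def build_subset_offsets (phase_count : List (String × Int)) : (List (String × Int)) × (List (String × List Int)) × Int :=
  let d := PySem.Dict.ofList phase_count
  let r := (PySem.List.sorted d.keys (fun x => x) false).foldl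
    (fun (st : PySem.Dict String Int × PySem.Dict String (List Int) × Int) sid =>
      let offsets := st.1.insert sid st.2.2
      let ids := PySem.List.pyRange st.2.2 (st.2.2 + d.getD sid 0) 1
      let subset_ids := st.2.1.insert sid ids
      (offsets, subset_ids, st.2.2 + d.getD sid 0))
    (PySem.Dict.empty, PySem.Dict.empty, 0)
  (r.1.items, r.2.1.items, r.2.2)

-- ===== PORT B =====
-- Source B's 'start(k) = sum(c for j, c in phase_count.items() if j < k)'.
def pvStartB (items : List (String × Int)) (k : String) : Int :=
  ((items.filter (fun p => decide (p.1 < k))).map Prod.snd).sum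

def build_subset_offsets_alt (phase_count : List (String × Int)) : (List (String × Int)) × (List (String × List Int)) × Int :=
  let d := PySem.Dict.ofList phase_count
  let offsets := PySem.Dict.ofList
    ((PySem.List.sorted d.keys (fun x => x) false).map (fun k => (k, pvStartB d.items k)))
  let subset_ids := PySem.Dict.ofList
    (offsets.items.map (fun p => (p.1, PySem.List.pyRange p.2 (p.2 + d.getD p.1 0) 1)))
  (offsets.items, subset_ids.items, d.values.sum)

-- ===== PRECONDITION & SPEC =====
def Spec_build_subset_offsets (phase_count : List (String × Int)) (out : (List (String × Int)) × (List (String × List Int)) × Int) : Prop := out = build_subset_offsets_alt phase_count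
instance (phase_count : List (String × Int)) (out : (List (String × Int)) × (List (String × List Int)) × Int) : Decidable (Spec_build_subset_offsets phase_count out) := by unfold Spec_build_subset_offsets; infer_instance

-- ===== CLAIM (what is proved, stated in full; the proofs are below) =====
def Claim_equal_build_subset_offsets : Prop := ∀ (phase_count : List (String × Int)), Dom_build_subset_offsets phase_count → Spec_build_subset_offsets phase_count (build_subset_offsets phase_count)

-- ===== LEMMAS AND PROOFS =====

-- The prefix-offset table of the keys ks starting at cur (A's running totals, named).
def pvStarts (f : String → Int) (ks : List String) (cur : Int) : List Int :=
  match ks with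
  | [] => []
  | k :: ks => cur :: pvStarts f ks (cur + f k)

theorem pvStarts_length (f : String → Int) (ks : List String) (cur : Int) :
    (pvStarts f ks cur).length = ks.length := by
  induction ks generalizing cur with
  | nil => rfl
  | cons k ks ih => simp [pvStarts, ih]

-- A's loop, characterised: over nodup fresh keys it appends the zip tables.
theorem loopA_items (f : String → Int) (ks : List String)
    (off : PySem.Dict String Int) (sub : PySem.Dict String (List Int)) (cur : Int)
    (hnd : ks.Nodup)
    (hoff : ∀ k ∈ ks, off.contains k = false)
    (hsub : ∀ k ∈ ks, sub.contains k = false) :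
    (ks.foldl
      (fun (st : PySem.Dict String Int × PySem.Dict String (List Int) × Int) sid =>
        (st.1.insert sid st.2.2,
         st.2.1.insert sid (PySem.List.pyRange st.2.2 (st.2.2 + f sid) 1),
         st.2.2 + f sid))
      (off, sub, cur)) =
    (off.update (ks.zip (pvStarts f ks cur)),
     sub.update ((ks.zip ((pvStarts f ks cur).zip (ks.map f))).map
        (fun p => (p.1, PySem.List.pyRange p.2.1 (p.2.1 + p.2.2) 1))),
     cur + (ks.map f).sum) := by
  induction ks generalizing off sub cur with
  | nil => simp [pvStarts, PySem.Dict.update]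
  | cons k ks ih =>
      simp only [List.foldl_cons, pvStarts, List.zip_cons_cons, List.map_cons, List.sum_cons]
      rw [ih (off.insert k cur)
            (sub.insert k (PySem.List.pyRange cur (cur + f k) 1)) (cur + f k)
            hnd.of_cons
            (fun x hx => by
              have hne : x ≠ k := fun h => (List.nodup_cons.mp hnd).1 (h ▸ hx)
              simp [PySem.Dict.contains_insert, hoff x (List.mem_cons_of_mem _ hx), hne])
            (fun x hx => by
              have hne : x ≠ k := fun h => (List.nodup_cons.mp hnd).1 (h ▸ hx)
              simp [PySem.Dict.contains_insert, hsub x (List.mem_cons_of_mem _ hx), hne])]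
      simp [PySem.Dict.update]
      ring

-- Dict.ofList of a nodup-keyed pair list keeps the list as its items.
theorem items_ofList_of_nodup {ν : Type} (l : List (String × ν))
    (h : (l.map Prod.fst).Nodup) : (PySem.Dict.ofList l).items = l := by
  have := PySem.Dict.items_foldl_insert_fresh l Prod.fst Prod.snd PySem.Dict.empty
      (fun a _ => PySem.Dict.contains_empty a.1) h
  simpa [PySem.Dict.ofList, PySem.Dict.update] using this

-- B's closed-form offsets, zipped against the keys, ARE A's prefix table.
theorem zip_starts_eq_map (f S : String → Int) :
    ∀ (ks : List String) (cur : Int), ks.Pairwise (· < ·) →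
    (∀ k ∈ ks, S k = cur + ((ks.filter (fun j => decide (j < k))).map f).sum) →
    ks.zip (pvStarts f ks cur) = ks.map (fun k => (k, S k)) := by
  intro ks
  induction ks with
  | nil => intro cur _ _; rfl
  | cons k ks ih =>
      intro cur hpw hS
      have hk : S k = cur := by
        have h0 : (k :: ks).filter (fun j => decide (j < k)) = [] := by
          rw [List.filter_eq_nil_iff]
          intro a ha
          rcases List.mem_cons.mp ha with rfl | ha
          · simp
          · have := (List.pairwise_cons.mp hpw).1 a ha
            simp [not_lt_of_gt this]
        rw [hS k List.mem_cons_self, h0]; simp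
      have htail : ks.zip (pvStarts f ks (cur + f k)) = ks.map (fun x => (x, S x)) := by
        refine ih (cur + f k) (List.pairwise_cons.mp hpw).2 ?_
        intro x hx
        have hkx : k < x := (List.pairwise_cons.mp hpw).1 x hx
        have hx' := hS x (List.mem_cons_of_mem _ hx)
        rw [List.filter_cons, if_pos (decide_eq_true hkx)] at hx'
        rw [hx', List.map_cons, List.sum_cons]
        ring
      simp [pvStarts, hk, htail]

-- collapsing A's triple zip into the pair zip
theorem zip_triple_map (f : String → Int) {α : Type} (g : Int → Int → α) :
    ∀ (ks : List String) (as_ : List Int), as_.length = ks.length →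
    ((ks.zip (as_.zip (ks.map f))).map (fun p => (p.1, g p.2.1 p.2.2)))
      = (ks.zip as_).map (fun p => (p.1, g p.2 (f p.1))) := by
  intro ks
  induction ks with
  | nil => intro as_ _; simp
  | cons k ks ih =>
      intro as_ hl
      cases as_ with
      | nil => simp at hl
      | cons a as_ =>
          simp only [List.map_cons, List.zip_cons_cons, List.map_cons]
          exact congrArg _ (ih as_ (by simpa using hl))

theorem agree_core (d : PySem.Dict String Int) (ks : List String)
    (hpw : ks.Pairwise (· < ·)) (hperm : ks.Perm d.keys) (hkeys : d.keys.Nodup) :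
    (let r := ks.foldl
        (fun (st : PySem.Dict String Int × PySem.Dict String (List Int) × Int) sid =>
          (st.1.insert sid st.2.2,
           st.2.1.insert sid (PySem.List.pyRange st.2.2 (st.2.2 + d.getD sid 0) 1),
           st.2.2 + d.getD sid 0))
        (PySem.Dict.empty, PySem.Dict.empty, 0)
     (r.1.items, r.2.1.items, r.2.2)) =
    (let offsets := PySem.Dict.ofList (ks.map (fun k => (k, pvStartB d.items k)))
     let subset_ids := PySem.Dict.ofList
        (offsets.items.map (fun p => (p.1, PySem.List.pyRange p.2 (p.2 + d.getD p.1 0) 1)))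
     (offsets.items, subset_ids.items, d.values.sum)) := by
  have hnd : ks.Nodup := hperm.nodup_iff.mpr hkeys
  -- the closed form satisfies the prefix-table recurrence
  have hS : ∀ k ∈ ks, pvStartB d.items k
      = 0 + ((ks.filter (fun j => decide (j < k))).map (fun j => d.getD j 0)).sum := by
    intro k _
    have hitems : d.items = d.keys.map (fun j => (j, d.getD j 0)) :=
      PySem.Dict.items_eq_map_keys d hkeys 0
    have hkf : pvStartB d.items k
        = ((d.keys.filter (fun j => decide (j < k))).map (fun j => d.getD j 0)).sum := by
      rw [pvStartB, hitems, List.filter_map, List.map_map]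
      simp [Function.comp_def]
    have hpf : ((ks.filter (fun j => decide (j < k))).map (fun j => d.getD j 0)).Perm
        ((d.keys.filter (fun j => decide (j < k))).map (fun j => d.getD j 0)) :=
      (hperm.filter _).map _
    rw [hkf, ← hpf.sum_eq]; ring
  have hzip : ks.zip (pvStarts (fun j => d.getD j 0) ks 0)
      = ks.map (fun k => (k, pvStartB d.items k)) :=
    zip_starts_eq_map (fun j => d.getD j 0) (pvStartB d.items) ks 0 hpw hS
  have hofflist : ((ks.map (fun k => (k, pvStartB d.items k))).map Prod.fst).Nodup := by
    simpa [List.map_map, Function.comp_def] using hnd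
  have hitems_off : (PySem.Dict.ofList (ks.map (fun k => (k, pvStartB d.items k)))).items
      = ks.map (fun k => (k, pvStartB d.items k)) :=
    items_ofList_of_nodup _ hofflist
  have hsub : ((ks.zip ((pvStarts (fun j => d.getD j 0) ks 0).zip
          (ks.map (fun j => d.getD j 0)))).map
        (fun p => (p.1, PySem.List.pyRange p.2.1 (p.2.1 + p.2.2) 1)))
      = (ks.map (fun k => (k, pvStartB d.items k))).map
          (fun p => (p.1, PySem.List.pyRange p.2 (p.2 + d.getD p.1 0) 1)) := by
    have h := zip_triple_map (fun j => d.getD j 0)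
        (fun s c => PySem.List.pyRange s (s + c) 1) ks
        (pvStarts (fun j => d.getD j 0) ks 0) (pvStarts_length _ ks 0)
    rw [hzip] at h
    exact h
  have hval : d.values.sum = (ks.map (fun j => d.getD j 0)).sum := by
    rw [PySem.Dict.values_eq_map_keys d hkeys 0]
    exact ((hperm.map _).sum_eq).symm
  rw [loopA_items (fun j => d.getD j 0) ks PySem.Dict.empty PySem.Dict.empty 0 hnd
        (fun k _ => PySem.Dict.contains_empty k) (fun k _ => PySem.Dict.contains_empty k)]
  refine Prod.ext ?_ (Prod.ext ?_ ?_)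
  · exact congrArg (fun l => (PySem.Dict.empty.update l).items) hzip
  · show (PySem.Dict.empty.update _).items = (PySem.Dict.empty.update _).items
    rw [hitems_off, ← hsub]
  · show 0 + _ = d.values.sum
    rw [hval]
    exact zero_add _

theorem build_subset_offsets_agree (phase_count : List (String × Int)) :
    build_subset_offsets phase_count = build_subset_offsets_alt phase_count := by
  unfold build_subset_offsets build_subset_offsets_alt
  have hkeys := PySem.Dict.nodup_keys_ofList phase_count
  have hperm := PySem.List.sorted_perm (PySem.Dict.ofList phase_count).keys (fun x => x) false
  have hle := PySem.List.sorted_pairwise (PySem.Dict.ofList phase_count).keys (fun x => x)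
  have hpw : (PySem.List.sorted (PySem.Dict.ofList phase_count).keys (fun x => x) false).Pairwise (· < ·) := by
    have hnd := hperm.nodup_iff.mpr hkeys
    exact List.Pairwise.imp₂ (fun a b h1 h2 => lt_of_le_of_ne h1 h2) hle hnd
  exact agree_core (PySem.Dict.ofList phase_count) _ hpw hperm hkeys

-- ===== VERDICT (by name: the statement is the Claim_ definition above) =====
theorem build_subset_offsets_spec : Claim_equal_build_subset_offsets := by
  intro pc _
  unfold Spec_build_subset_offsets
  exact build_subset_offsets_agree pc
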